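-- pv_equiv track=rewrite | github.com/ChakradharG/CompetitiveCoding | LeetCode/Chakradhar/3791.py | countBalanced
-- ===== SOURCE A (Python) =====
-- def countBalanced(low: int, high: int) -> int:
--     def dfs(i, tight, diff):
--         if i == n:
--             if diff == 0:
--                 return 1
--             else:
--                 return 0
--         key = (i, tight, diff)
--         if key not in memo:
--             r = int(num[i]) if tight else 9
--             memo[key] = 0
--             for d in range(r+1):
--                 memo[key] += dfs(i+1, tight and (d==int(num[i])), diff + ((-1)**(i%2))*d)
--         return memo[key]
--
--     memo = {}
--     num = str(high)
--     n = len(num)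
--     b = dfs(0, True, 0)
--     memo = {}
--     num = str(low-1)
--     n = len(num)
--     a = dfs(0, True, 0)
--
--     return b - a
-- ===== SOURCE B (Python) =====
-- def countBalanced(low: int, high: int) -> int:
--     # Iterative digit DP: precompute a suffix table, then one left-to-right pass.
--     def f(x):
--         s = str(x)
--         n = len(s)
--         # ways[j] maps a signed sum t to the number of ways to fill the last j
--         # positions (absolute positions n-j .. n-1, sign +1 on even positions)
--         # so that their signed digit sum equals t.
--         ways = [{0: 1}]
--         for j in range(1, n + 1):
--             sign = 1 if (n - j) % 2 == 0 else -1
--             w = {}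
--             for t, c in ways[j - 1].items():
--                 for d in range(10):
--                     key = t + sign * d
--                     w[key] = w.get(key, 0) + c
--             ways.append(w)
--         total = 0
--         diff = 0
--         for i in range(n):
--             dig = int(s[i])
--             sign = 1 if i % 2 == 0 else -1
--             for d in range(dig):
--                 total += ways[n - 1 - i].get(-(diff + sign * d), 0)
--             diff += sign * dig
--         if diff == 0:
--             total += 1
--         return total
--
--     return f(high) - f(low - 1)
-- ===== Notes on version B (the rewrite author's own statement) =====
-- stated objective: alternative
-- what changed: Replaces the memoized top-down recursion with an explicit bottom-up suffix table ways[j][t] (counts of free-digit fills of the last j positions with signed sum t) plus one non-recursive left-to-right pass along the tight prefix; Pre_ excludes low <= 0 and high < 0, where A raises ValueError on int('-').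
import Mathlib
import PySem

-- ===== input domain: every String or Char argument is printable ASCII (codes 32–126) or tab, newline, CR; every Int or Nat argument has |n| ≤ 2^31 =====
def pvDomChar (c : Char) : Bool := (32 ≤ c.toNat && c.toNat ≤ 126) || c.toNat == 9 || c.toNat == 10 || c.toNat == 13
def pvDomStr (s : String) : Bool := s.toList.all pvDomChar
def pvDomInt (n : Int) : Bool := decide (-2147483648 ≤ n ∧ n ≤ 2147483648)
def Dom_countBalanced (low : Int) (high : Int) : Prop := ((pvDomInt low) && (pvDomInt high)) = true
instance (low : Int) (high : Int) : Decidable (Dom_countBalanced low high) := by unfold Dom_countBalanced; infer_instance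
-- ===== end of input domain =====

-- B replaces A's memoized top-down digit-DP recursion by a bottom-up suffix table plus one
-- non-recursive left-to-right pass along the tight prefix (alternative decomposition, same results).


-- ===== PORT A =====
-- int(c) for a single-character string; Python raises ValueError on a non-digit char — such
-- characters are never reached on inputs admitted by Pre_ (the numbers printed are nonnegative),
-- and the port uses 0 there.  Shared by both ports (both Pythons do int(<one char>)).
def pyIntOfChar (c : Char) : Int := (PySem.Int.ofChars? [c]).getD 0

-- dfs(i, tight, diff) with the memo dict threaded through; fuel = n - i (i == n ↔ fuel = 0).
-- num.getD i ' ' is num[i]: i < num.length on every reachable call.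
def dfsA (num : List Char) (fuel : Nat) (i : Nat) (tight : Bool) (diff : Int)
    (memo : PySem.Dict (Nat × Bool × Int) Int) : Int × PySem.Dict (Nat × Bool × Int) Int :=
  match fuel with
  | 0 => ((if diff = 0 then 1 else 0), memo)
  | Nat.succ fuel' =>
    let key : Nat × Bool × Int := (i, tight, diff)
    match memo.get? key with
    | some v => (v, memo)
    | none =>
      let di := pyIntOfChar (num.getD i ' ')
      let r : Int := if tight then di else 9
      let m1 := (PySem.List.pyRange 0 (r + 1) 1).foldl (fun m d =>
          let cur := m.getD key 0
          let p := dfsA num fuel' (i + 1) (tight && decide (d = di)) (diff + (-1) ^ (i % 2) * d) m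
          p.2.insert key (cur + p.1)) (memo.insert key 0)
      (m1.getD key 0, m1)

def countBalanced (low : Int) (high : Int) : Int :=
  let num := (PySem.Int.toStr high).toList
  let b := (dfsA num num.length 0 true 0 PySem.Dict.empty).1
  let num2 := (PySem.Int.toStr (low - 1)).toList
  let a := (dfsA num2 num2.length 0 true 0 PySem.Dict.empty).1
  b - a

-- ===== PORT B =====
-- ways = [{0:1}]; for j in 1..n append the convolution of ways[j-1] with one free digit
-- at absolute position n-j (sign +1 on even positions).
def buildWays (n : Nat) : List (PySem.Dict Int Int) :=
  (PySem.List.pyRange 1 ((n : Int) + 1) 1).foldl (fun ways j =>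
    let sign : Int := if PySem.Int.mod ((n : Int) - j) 2 = 0 then 1 else -1
    let prev := (PySem.List.pyGet? ways (j - 1)).getD PySem.Dict.empty
    let w := prev.items.foldl (fun w tc =>
        (PySem.List.pyRange 0 10 1).foldl (fun w d =>
          let key := tc.1 + sign * d
          w.insert key (w.getD key 0 + tc.2)) w) PySem.Dict.empty
    ways ++ [w]) [PySem.Dict.ofList [((0 : Int), (1 : Int))]]

-- f(x): build the table, then one pass over str(x); s.getD i.toNat ' ' is s[i] (0 ≤ i < n).
def fB (x : Int) : Int :=
  let s := (PySem.Int.toStr x).toList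
  let n := s.length
  let ways := buildWays n
  let res := (PySem.List.pyRange 0 (n : Int) 1).foldl (fun (td : Int × Int) i =>
    let dig := pyIntOfChar (s.getD i.toNat ' ')
    let sign : Int := if PySem.Int.mod i 2 = 0 then 1 else -1
    let total := (PySem.List.pyRange 0 dig 1).foldl (fun total d =>
        total + ((PySem.List.pyGet? ways ((n : Int) - 1 - i)).getD PySem.Dict.empty).getD
          (-(td.2 + sign * d)) 0) td.1
    (total, td.2 + sign * dig)) ((0 : Int), (0 : Int))
  if res.2 = 0 then res.1 + 1 else res.1

def countBalanced_alt (low : Int) (high : Int) : Int := fB high - fB (low - 1)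

-- ===== PRECONDITION & SPEC =====
-- Python A raises ValueError (int('-')) whenever str(high) or str(low-1) starts with '-',
-- i.e. whenever high < 0 or low ≤ 0; exactly those inputs are excluded.
def Pre_countBalanced (low : Int) (high : Int) : Prop := 1 ≤ low ∧ 0 ≤ high
instance (low : Int) (high : Int) : Decidable (Pre_countBalanced low high) := by
  unfold Pre_countBalanced; infer_instance
def pvWitness_countBalanced : Int × Int := (1, 10)

def Spec_countBalanced (low : Int) (high : Int) (out : Int) : Prop := out = countBalanced_alt low high
instance (low : Int) (high : Int) (out : Int) : Decidable (Spec_countBalanced low high out) := by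
  unfold Spec_countBalanced; infer_instance

-- ===== CLAIM (what is proved, stated in full; the proofs are below) =====
def Claim_equal_countBalanced : Prop := ∀ (low : Int) (high : Int), Dom_countBalanced low high →
  Pre_countBalanced low high → Spec_countBalanced low high (countBalanced low high)

-- ===== LEMMAS AND PROOFS =====

lemma getD_bind_natCast_nonneg (o : Option Nat) : 0 ≤ (o.bind fun a => some ((a : Nat) : Int)).getD 0 := by
  cases o <;> simp

lemma pyIntOfChar_nonneg (c : Char) : 0 ≤ pyIntOfChar c := by
  by_cases h1 : c = '-'; · subst h1; decide
  by_cases h2 : c = '+'; · subst h2; decide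
  unfold pyIntOfChar PySem.Int.ofChars?
  by_cases hs : PySem.Int.isIntSpace c
  · simpa [List.dropWhile, hs] using getD_bind_natCast_nonneg _
  · simp only [List.dropWhile, hs, List.reverse_cons, List.reverse_nil, List.nil_append]
    split
    · rename_i ds hd; simp at hd; exact absurd hd.1 h1
    · rename_i ds hd; simp at hd; exact absurd hd.1 h2
    · simpa using getD_bind_natCast_nonneg _

-- sign of absolute position i
def sgn (i : Nat) : Int := (-1) ^ (i % 2)

lemma sgn_eq (m : Nat) : sgn m = if m % 2 = 0 then (1 : Int) else -1 := by
  unfold sgn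
  rcases Nat.mod_two_eq_zero_or_one m with h | h <;> simp [h]

def digitsOf (s : List Char) : List Int := s.map pyIntOfChar

-- pure, memo-free form of A's dfs
def dfsP (ds : List Int) (i : Nat) (tight : Bool) (diff : Int) : Int :=
  match ds with
  | [] => if diff = 0 then 1 else 0
  | d0 :: tl =>
    ((PySem.List.pyRange 0 ((if tight then d0 else 9) + 1) 1).map (fun d =>
        dfsP tl (i + 1) (tight && decide (d = d0)) (diff + sgn i * d))).sum

-- W j m t : #assignments of j free digits at positions m, m+1, … with signed sum t
def W : Nat → Nat → Int → Int
  | 0, _, t => if t = 0 then 1 else 0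
  | j + 1, m, t => ((PySem.List.pyRange 0 10 1).map (fun d => W j (m + 1) (t - sgn m * d))).sum

lemma dfsP_false (ds : List Int) (i : Nat) (diff : Int) :
    dfsP ds i false diff = W ds.length i (-diff) := by
  induction ds generalizing i diff with
  | nil => simp [dfsP, W, neg_eq_zero]
  | cons d0 tl ih =>
    simp only [dfsP, W, Bool.false_and, List.length_cons, Bool.false_eq_true, reduceIte]
    norm_num
    congr 1
    apply List.map_congr_left
    intro d _
    rw [ih]
    ring_nf

def scanP (n : Nat) (ds : List Int) (i : Nat) (total diff : Int) : Int × Int :=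
  match ds with
  | [] => (total, diff)
  | d0 :: tl =>
    scanP n tl (i + 1)
      (total + ((PySem.List.pyRange 0 d0 1).map
          (fun d => W (n - 1 - i) (i + 1) (-(diff + sgn i * d)))).sum)
      (diff + sgn i * d0)

lemma scanP_spec (n : Nat) (ds : List Int) (i : Nat) (total diff : Int)
    (hlen : i + ds.length = n) (hnn : ∀ d ∈ ds, 0 ≤ d) :
    total + dfsP ds i true diff =
      (scanP n ds i total diff).1 + (if (scanP n ds i total diff).2 = 0 then 1 else 0) := by
  induction ds generalizing i total diff with
  | nil => simp [dfsP, scanP]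
  | cons d0 tl ih =>
    have hd0 : 0 ≤ d0 := hnn d0 (by simp)
    have hsplit : PySem.List.pyRange 0 (d0 + 1) 1 = PySem.List.pyRange 0 d0 1 ++ [d0] :=
      PySem.List.pyRange_one_succ_right hd0
    have htl : tl.length = n - 1 - i := by simp at hlen; omega
    simp only [dfsP, scanP, if_true]
    rw [hsplit, List.map_append, List.sum_append]
    have hmap : (PySem.List.pyRange 0 d0 1).map
        (fun d => dfsP tl (i + 1) (true && decide (d = d0)) (diff + sgn i * d)) =
        (PySem.List.pyRange 0 d0 1).map (fun d => W (n - 1 - i) (i + 1) (-(diff + sgn i * d))) := by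
      apply List.map_congr_left
      intro d hd
      have hdlt : d < d0 := (PySem.List.mem_pyRange_one.mp hd).2
      have : decide (d = d0) = false := by simp; omega
      rw [this, Bool.and_false, dfsP_false, htl]
    rw [hmap]
    simp only [List.map_cons, List.map_nil, List.sum_cons, List.sum_nil, add_zero,
      decide_true, Bool.and_true]
    have H := ih (i + 1)
      (total + ((PySem.List.pyRange 0 d0 1).map (fun d => W (n - 1 - i) (i + 1) (-(diff + sgn i * d)))).sum)
      (diff + sgn i * d0) (by simp at hlen ⊢; omega) (fun d hd => hnn d (by simp [hd]))
    rw [← add_assoc]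
    exact H

def GoodMemo (D : List Int) (i : Nat) (memo : PySem.Dict (Nat × Bool × Int) Int) : Prop :=
  ∀ k v, memo.get? k = some v → i ≤ k.1 → v = dfsP (D.drop k.1) k.1 k.2.1 k.2.2

lemma dfsA_correct (num : List Char) (fuel i : Nat) (tight : Bool) (diff : Int)
    (memo : PySem.Dict (Nat × Bool × Int) Int)
    (hfi : i + fuel = num.length) (hG : GoodMemo (digitsOf num) i memo) :
    (dfsA num fuel i tight diff memo).1 = dfsP ((digitsOf num).drop i) i tight diff ∧
    GoodMemo (digitsOf num) i (dfsA num fuel i tight diff memo).2 ∧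
    (∀ k : Nat × Bool × Int, k.1 < i →
      (dfsA num fuel i tight diff memo).2.get? k = memo.get? k) := by
  induction fuel generalizing i tight diff memo with
  | zero =>
    have hdrop : (digitsOf num).drop i = [] := by
      apply List.drop_eq_nil_of_le; simp [digitsOf]; omega
    refine ⟨?_, hG, fun k _ => rfl⟩
    simp [dfsA, hdrop, dfsP]
  | succ fuel' IH =>
    have hi : i < num.length := by omega
    have hiD : i < (digitsOf num).length := by simp [digitsOf]; omega
    have hdi : (digitsOf num)[i] = pyIntOfChar (num.getD i ' ') := by
      simp [digitsOf, List.getD, List.getElem?_eq_getElem hi]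
    have hdrop : (digitsOf num).drop i = (digitsOf num)[i] :: (digitsOf num).drop (i + 1) :=
      List.drop_eq_getElem_cons hiD
    cases hmg : memo.get? ((i, tight, diff) : Nat × Bool × Int) with
    | some v =>
      have hv := hG (i, tight, diff) v hmg (le_refl i)
      refine ⟨?_, ?_, ?_⟩
      · simp only [dfsA, hmg]; simpa using hv
      · simp only [dfsA, hmg]; exact hG
      · intro k _; simp [dfsA, hmg]
    | none =>
      have inner : ∀ (L : List Int) (m : PySem.Dict (Nat × Bool × Int) Int) (acc : Int),
          m.get? ((i, tight, diff) : Nat × Bool × Int) = some acc → GoodMemo (digitsOf num) (i + 1) m →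
          (∀ k : Nat × Bool × Int, k ≠ (i, tight, diff) → k.1 < i + 1 → m.get? k = memo.get? k) →
          (L.foldl (fun m d =>
              let cur := m.getD (i, tight, diff) 0
              let p := dfsA num fuel' (i + 1) (tight && decide (d = pyIntOfChar (num.getD i ' ')))
                (diff + (-1) ^ (i % 2) * d) m
              p.2.insert (i, tight, diff) (cur + p.1)) m).get? ((i, tight, diff) : Nat × Bool × Int) =
            some (acc + (L.map (fun d =>
              dfsP ((digitsOf num).drop (i + 1)) (i + 1)
                (tight && decide (d = pyIntOfChar (num.getD i ' '))) (diff + sgn i * d))).sum) ∧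
          GoodMemo (digitsOf num) (i + 1) (L.foldl (fun m d =>
              let cur := m.getD (i, tight, diff) 0
              let p := dfsA num fuel' (i + 1) (tight && decide (d = pyIntOfChar (num.getD i ' ')))
                (diff + (-1) ^ (i % 2) * d) m
              p.2.insert (i, tight, diff) (cur + p.1)) m) ∧
          (∀ k : Nat × Bool × Int, k ≠ (i, tight, diff) → k.1 < i + 1 →
            (L.foldl (fun m d =>
              let cur := m.getD (i, tight, diff) 0
              let p := dfsA num fuel' (i + 1) (tight && decide (d = pyIntOfChar (num.getD i ' ')))
                (diff + (-1) ^ (i % 2) * d) m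
              p.2.insert (i, tight, diff) (cur + p.1)) m).get? k = memo.get? k) := by
        intro L
        induction L with
        | nil =>
          intro m acc h1 h2 h3
          exact ⟨by simpa using h1, h2, h3⟩
        | cons d L ihL =>
          intro m acc h1 h2 h3
          have hcur : m.getD ((i, tight, diff) : Nat × Bool × Int) 0 = acc := by
            simp [PySem.Dict.getD_eq_get?_getD, h1]
          obtain ⟨hv, hg, hf⟩ := IH (i + 1) (tight && decide (d = pyIntOfChar (num.getD i ' ')))
            (diff + (-1) ^ (i % 2) * d) m (by omega) h2
          simp only [List.foldl_cons]
          set q := dfsA num fuel' (i + 1) (tight && decide (d = pyIntOfChar (num.getD i ' ')))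
            (diff + (-1) ^ (i % 2) * d) m with hq
          rw [hcur]
          have hm2key : (q.2.insert (i, tight, diff) (acc + q.1)).get?
              ((i, tight, diff) : Nat × Bool × Int) = some (acc + q.1) := by
            rw [PySem.Dict.get?_insert_self]
          have hm2good : GoodMemo (digitsOf num) (i + 1) (q.2.insert (i, tight, diff) (acc + q.1)) := by
            intro k v hkv hik
            by_cases hk : k = (i, tight, diff)
            · subst hk; simp at hik
            · rw [PySem.Dict.get?_insert_of_ne _ _ hk] at hkv
              exact hg k v hkv hik
          have hm2f : ∀ k : Nat × Bool × Int, k ≠ (i, tight, diff) → k.1 < i + 1 →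
              (q.2.insert (i, tight, diff) (acc + q.1)).get? k = memo.get? k := by
            intro k hk hki
            rw [PySem.Dict.get?_insert_of_ne _ _ hk, hf k hki]
            exact h3 k hk hki
          obtain ⟨r1, r2, r3⟩ := ihL (q.2.insert (i, tight, diff) (acc + q.1)) (acc + q.1)
            hm2key hm2good hm2f
          refine ⟨?_, r2, r3⟩
          rw [r1, hv]
          simp only [List.map_cons, List.sum_cons]
          have hz : sgn i = (-1 : Int) ^ (i % 2) := rfl
          rw [hz]
          congr 1
          ring
      have hm0good : GoodMemo (digitsOf num) (i + 1) (memo.insert (i, tight, diff) 0) := by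
        intro k v hkv hik
        by_cases hk : k = (i, tight, diff)
        · subst hk; simp at hik
        · rw [PySem.Dict.get?_insert_of_ne _ _ hk] at hkv
          exact hG k v hkv (by omega)
      obtain ⟨r1, r2, r3⟩ := inner
        (PySem.List.pyRange 0 ((if tight then pyIntOfChar (num.getD i ' ') else 9) + 1) 1)
        (memo.insert (i, tight, diff) 0) 0 (PySem.Dict.get?_insert_self _ _ _) hm0good
        (fun k hk _ => PySem.Dict.get?_insert_of_ne _ _ hk)
      have hsum : (0 : Int) + ((PySem.List.pyRange 0 ((if tight then pyIntOfChar (num.getD i ' ') else 9) + 1) 1).map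
          (fun d => dfsP ((digitsOf num).drop (i + 1)) (i + 1)
            (tight && decide (d = pyIntOfChar (num.getD i ' '))) (diff + sgn i * d))).sum =
          dfsP ((digitsOf num).drop i) i tight diff := by
        conv_rhs => rw [hdrop]
        simp only [dfsP, zero_add, hdi]
      refine ⟨?_, ?_, ?_⟩
      · simp only [dfsA, hmg]
        rw [PySem.Dict.getD_eq_get?_getD]
        rw [r1, Option.getD_some]
        exact hsum
      · intro k v hkv hik
        simp only [dfsA, hmg] at hkv
        by_cases hk : k = (i, tight, diff)
        · subst hk
          rw [r1] at hkv
          injection hkv with hv'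
          rw [← hv']
          exact (by simpa using hsum)
        · by_cases hki : k.1 < i + 1
          · rw [r3 k hk hki] at hkv
            exact hG k v hkv hik
          · exact r2 k v hkv (by omega)
      · intro k hki
        simp only [dfsA, hmg]
        refine r3 k ?_ (by omega)
        intro h; rw [h] at hki; simp at hki


lemma countBalanced_eq_dfsP (x : Int) :
    (dfsA ((PySem.Int.toStr x).toList) ((PySem.Int.toStr x).toList).length 0 true 0 PySem.Dict.empty).1 =
      dfsP (digitsOf ((PySem.Int.toStr x).toList)) 0 true 0 := by
  have h := dfsA_correct ((PySem.Int.toStr x).toList) ((PySem.Int.toStr x).toList).length 0 true 0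
    PySem.Dict.empty (by omega) (by intro k v hkv _; simp [PySem.Dict.get?_empty] at hkv)
  simpa using h.1

-- sum swap for lists
lemma sum_sum_comm {α β : Type} (l1 : List α) (l2 : List β) (f : α → β → Int) :
    (l1.map (fun a => (l2.map (f a)).sum)).sum = (l2.map (fun b => (l1.map (fun a => f a b)).sum)).sum := by
  induction l1 with
  | nil => simp
  | cons a l1 ih =>
    simp only [List.map_cons, List.sum_cons, ih]
    rw [← PySem.List.sum_map_add_int]

-- value of a counter-style insert fold
lemma getD_insert_fold (l : List Int) (key : Int → Int) (c : Int) (w : PySem.Dict Int Int) (u : Int) :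
    (l.foldl (fun w d => w.insert (key d) (w.getD (key d) 0 + c)) w).getD u 0 =
      w.getD u 0 + (l.map (fun d => if key d = u then c else 0)).sum := by
  induction l generalizing w with
  | nil => simp
  | cons d l ih =>
    simp only [List.foldl_cons, List.map_cons, List.sum_cons, ih]
    rw [PySem.Dict.getD_insert]
    by_cases h : u = key d
    · simp [h, eq_comm]; ring
    · have : ¬ (key d = u) := fun hh => h hh.symm
      simp [h, this]

-- sum over the items of a nodup-key dict of "value if key = t"
lemma sum_items_pick (l : List (Int × Int)) (t : Int) (hnd : (l.map Prod.fst).Nodup) :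
    (l.map (fun tc => if tc.1 = t then tc.2 else 0)).sum = (PySem.Dict.mk l).getD t 0 := by
  induction l with
  | nil => rfl
  | cons p l ih =>
    simp only [List.map_cons, List.sum_cons]
    rw [PySem.Dict.getD_eq_get?_getD, PySem.Dict.get?_mk_cons]
    by_cases h : p.1 = t
    · simp only [h, if_true, beq_self_eq_true]
      simp only [List.map_cons] at hnd
      have hnot : t ∉ l.map Prod.fst := h ▸ (List.nodup_cons.mp hnd).1
      have hz : (l.map (fun tc => if tc.1 = t then tc.2 else 0)).sum = 0 := by
        apply List.sum_eq_zero
        intro x hx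
        simp only [List.mem_map] at hx
        obtain ⟨tc, htc, hxx⟩ := hx
        have : tc.1 ≠ t := by
          intro hh; exact hnot (by exact List.mem_map.mpr ⟨tc, htc, hh⟩)
        rw [← hxx]; simp [this]
      simp [hz]
    · have hb : (p.1 == t) = false := by simp [h]
      rw [hb]
      simp only [if_neg h, zero_add]
      rw [ih (by simp only [List.map_cons] at hnd; exact hnd.tail)]
      rw [PySem.Dict.getD_eq_get?_getD]
      simp

def dictW (n : Nat) : Nat → PySem.Dict Int Int
  | 0 => PySem.Dict.ofList [((0 : Int), (1 : Int))]
  | j + 1 =>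
    (dictW n j).items.foldl (fun w tc =>
        (PySem.List.pyRange 0 10 1).foldl (fun w d =>
          w.insert (tc.1 + sgn (n - (j + 1)) * d) (w.getD (tc.1 + sgn (n - (j + 1)) * d) 0 + tc.2)) w)
      PySem.Dict.empty

-- the outer fold over items, value-wise
lemma conv_getD (items : List (Int × Int)) (sign : Int) (w0 : PySem.Dict Int Int) (u : Int) :
    (items.foldl (fun w tc =>
        (PySem.List.pyRange 0 10 1).foldl (fun w d =>
          w.insert (tc.1 + sign * d) (w.getD (tc.1 + sign * d) 0 + tc.2)) w) w0).getD u 0 =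
      w0.getD u 0 + (items.map (fun tc =>
        ((PySem.List.pyRange 0 10 1).map (fun d => if tc.1 + sign * d = u then tc.2 else 0)).sum)).sum := by
  induction items generalizing w0 with
  | nil => simp
  | cons tc items ih =>
    simp only [List.foldl_cons, List.map_cons, List.sum_cons, ih]
    rw [getD_insert_fold (PySem.List.pyRange 0 10 1) (fun d => tc.1 + sign * d) tc.2 w0 u]
    ring

lemma nodup_conv (items : List (Int × Int)) (sign : Int) (w0 : PySem.Dict Int Int)
    (h : w0.keys.Nodup) :
    ((items.foldl (fun w tc =>
        (PySem.List.pyRange 0 10 1).foldl (fun w d =>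
          w.insert (tc.1 + sign * d) (w.getD (tc.1 + sign * d) 0 + tc.2)) w) w0).keys).Nodup := by
  induction items generalizing w0 with
  | nil => simpa
  | cons tc items ih =>
    simp only [List.foldl_cons]
    apply ih
    exact PySem.Dict.nodup_keys_foldl_insert_key _ (fun d => tc.1 + sign * d) _ _ h

lemma dictW_nodup (n j : Nat) : ((dictW n j).keys).Nodup := by
  cases j with
  | zero => simp [dictW, PySem.Dict.nodup_keys_ofList]
  | succ j => exact nodup_conv _ _ _ (by simp [PySem.Dict.keys_empty])

lemma dictW_getD (n : Nat) : ∀ (j : Nat), j ≤ n → ∀ (t : Int),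
    (dictW n j).getD t 0 = W j (n - j) t := by
  intro j
  induction j with
  | zero =>
    intro _ t
    show (PySem.Dict.ofList [((0 : Int), (1 : Int))]).getD t 0 = if t = 0 then 1 else 0
    by_cases h : t = 0
    · subst h; rfl
    · rw [if_neg h]
      rw [PySem.Dict.getD_eq_get?_getD]
      have : (PySem.Dict.ofList [((0 : Int), (1 : Int))]).get? t = none := by
        rw [show PySem.Dict.ofList [((0 : Int), (1 : Int))] = PySem.Dict.mk [((0 : Int), (1 : Int))] from rfl]
        rw [PySem.Dict.get?_mk_cons]
        simp [Ne.symm h]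
        rfl
      rw [this]; rfl
  | succ j ih =>
    intro hj t
    show ((dictW n j).items.foldl _ PySem.Dict.empty).getD t 0 = _
    rw [conv_getD]
    have hW : W (j + 1) (n - (j + 1)) t =
        ((PySem.List.pyRange 0 10 1).map (fun d => W j (n - j) (t - sgn (n - (j + 1)) * d))).sum := by
      show ((PySem.List.pyRange 0 10 1).map (fun d => W j ((n - (j+1)) + 1) (t - sgn (n - (j + 1)) * d))).sum = _
      have : n - (j + 1) + 1 = n - j := by omega
      rw [this]
    rw [hW]
    rw [sum_sum_comm ((dictW n j).items) (PySem.List.pyRange 0 10 1)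
      (fun tc d => if tc.1 + sgn (n - (j + 1)) * d = t then tc.2 else 0)]
    have hz : (PySem.Dict.empty : PySem.Dict Int Int).getD t 0 = 0 := rfl
    rw [hz, zero_add]
    congr 1
    apply List.map_congr_left
    intro d _
    have hpick := sum_items_pick (dictW n j).items (t - sgn (n - (j + 1)) * d)
      (by simpa [PySem.Dict.keys] using dictW_nodup n j)
    have heta : (PySem.Dict.mk (dictW n j).items) = dictW n j := rfl
    rw [heta] at hpick
    rw [← ih (by omega) (t - sgn (n - (j + 1)) * d), ← hpick]
    congr 1
    apply List.map_congr_left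
    intro tc _
    have hiff : (tc.1 + sgn (n - (j + 1)) * d = t) ↔ (tc.1 = t - sgn (n - (j + 1)) * d) := by
      constructor <;> intro hh <;> linarith
    simp only [hiff]

lemma buildWays_prefix (n : Nat) (k : Nat) (hk : k ≤ n) :
    ((PySem.List.pyRange 1 ((k : Int) + 1) 1).foldl (fun ways j =>
      let sign : Int := if PySem.Int.mod ((n : Int) - j) 2 = 0 then 1 else -1
      let prev := (PySem.List.pyGet? ways (j - 1)).getD PySem.Dict.empty
      let w := prev.items.foldl (fun w tc =>
          (PySem.List.pyRange 0 10 1).foldl (fun w d =>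
            let key := tc.1 + sign * d
            w.insert key (w.getD key 0 + tc.2)) w) PySem.Dict.empty
      ways ++ [w]) [PySem.Dict.ofList [((0 : Int), (1 : Int))]]) = (List.range (k + 1)).map (dictW n) := by
  induction k with
  | zero =>
    rw [show PySem.List.pyRange 1 (((0 : Nat) : Int) + 1) 1 = [] from
      PySem.List.pyRange_one_eq_nil (by norm_num)]
    simp [dictW]
  | succ k ih =>
    have hcast : ((k + 1 : Nat) : Int) + 1 = ((k : Int) + 1) + 1 := by omega
    rw [hcast, show PySem.List.pyRange 1 (((k : Int) + 1) + 1) 1 =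
      PySem.List.pyRange 1 ((k : Int) + 1) 1 ++ [(k : Int) + 1] from
      PySem.List.pyRange_one_succ_right (by omega), List.foldl_append]
    rw [ih (by omega)]
    simp only [List.foldl_cons, List.foldl_nil]
    have hsign : (if PySem.Int.mod ((n : Int) - ((k : Int) + 1)) 2 = 0 then (1 : Int) else -1) =
        sgn (n - (k + 1)) := by
      have hc : (n : Int) - ((k : Int) + 1) = ((n - (k + 1) : Nat) : Int) := by omega
      rw [hc, sgn_eq]
      rw [show ((2 : Int)) = ((2 : Nat) : Int) from rfl, PySem.Int.mod_natCast]
      congr 1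
      simp only [eq_iff_iff]
      omega
    rw [hsign]
    have hprev : (PySem.List.pyGet? ((List.range (k + 1)).map (dictW n)) (((k : Int) + 1) - 1)).getD
        PySem.Dict.empty = dictW n k := by
      have : ((k : Int) + 1) - 1 = ((k : Nat) : Int) := by ring
      rw [this, PySem.List.pyGet?_natCast]
      simp
    rw [hprev]
    conv_rhs => rw [List.range_succ, List.map_append]
    congr 1
lemma buildWays_eq (n : Nat) : buildWays n = (List.range (n + 1)).map (dictW n) := by
  have := buildWays_prefix n n (le_refl n)
  simpa [buildWays] using this

lemma scan_fold (s : List Char) (m : Nat) : ∀ (k : Nat), k + m = s.length → ∀ (total diff : Int),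
    ((PySem.List.pyRange (k : Int) (s.length : Int) 1).foldl
      (fun (td : Int × Int) i =>
        ((PySem.List.pyRange 0 (pyIntOfChar (s.getD i.toNat ' ')) 1).foldl (fun total d =>
            total + ((PySem.List.pyGet? (buildWays s.length) ((s.length : Int) - 1 - i)).getD
              PySem.Dict.empty).getD
              (-(td.2 + (if PySem.Int.mod i 2 = 0 then (1 : Int) else -1) * d)) 0) td.1,
         td.2 + (if PySem.Int.mod i 2 = 0 then (1 : Int) else -1) * pyIntOfChar (s.getD i.toNat ' ')))
      (total, diff))
     = scanP s.length ((digitsOf s).drop k) k total diff := by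
  induction m with
  | zero =>
    intro k hk total diff
    rw [show (PySem.List.pyRange (k : Int) (s.length : Int) 1) = [] from
      PySem.List.pyRange_one_eq_nil (by omega)]
    have hdrop : (digitsOf s).drop k = [] := by
      apply List.drop_eq_nil_of_le; simp [digitsOf]; omega
    rw [hdrop]
    rfl
  | succ m ih =>
    intro k hk total diff
    have hklt : k < s.length := by omega
    have hkD : k < (digitsOf s).length := by simp [digitsOf]; omega
    rw [show (PySem.List.pyRange (k : Int) (s.length : Int) 1) =
      (k : Int) :: PySem.List.pyRange ((k : Int) + 1) (s.length : Int) 1 from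
      PySem.List.pyRange_one_cons (by omega)]
    simp only [List.foldl_cons]
    have h1 : pyIntOfChar (s.getD ((k : Int)).toNat ' ') = (digitsOf s)[k] := by
      simp [digitsOf, List.getD, List.getElem?_eq_getElem hklt]
    have h2 : (if PySem.Int.mod ((k : Int)) 2 = 0 then (1 : Int) else -1) = sgn k := by
      rw [sgn_eq]
      congr 1
      rw [show ((2 : Int)) = ((2 : Nat) : Int) from rfl, PySem.Int.mod_natCast]
      simp only [eq_iff_iff]
      omega
    have h3 : (PySem.List.pyGet? (buildWays s.length) ((s.length : Int) - 1 - (k : Int))).getD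
        PySem.Dict.empty = dictW s.length (s.length - 1 - k) := by
      rw [buildWays_eq]
      rw [show (s.length : Int) - 1 - (k : Int) = ((s.length - 1 - k : Nat) : Int) from by omega]
      rw [PySem.List.pyGet?_natCast]
      simp [List.getElem?_range (show s.length - 1 - k < s.length + 1 by omega)]
    rw [h1, h2, h3]
    have h4 : ∀ t : Int, (dictW s.length (s.length - 1 - k)).getD t 0 =
        W (s.length - 1 - k) (k + 1) t := by
      intro t
      rw [dictW_getD s.length (s.length - 1 - k) (by omega) t]
      congr 1
      omega
    have h5 : ((PySem.List.pyRange 0 ((digitsOf s)[k]) 1).foldl (fun total d =>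
        total + (dictW s.length (s.length - 1 - k)).getD (-((total, diff).2 + sgn k * d)) 0)
        ((total, diff).1)) =
        total + ((PySem.List.pyRange 0 ((digitsOf s)[k]) 1).map (fun d =>
          W (s.length - 1 - k) (k + 1) (-(diff + sgn k * d)))).sum := by
      rw [PySem.List.foldl_add (PySem.List.pyRange 0 ((digitsOf s)[k]) 1)
        (fun d => (dictW s.length (s.length - 1 - k)).getD (-((total, diff).2 + sgn k * d)) 0)
        ((total, diff).1)]
      congr 1
      congr 1
      apply List.map_congr_left
      intro d _
      rw [h4]
    rw [h5]
    have hdropk : (digitsOf s).drop k = (digitsOf s)[k] :: (digitsOf s).drop (k + 1) :=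
      List.drop_eq_getElem_cons hkD
    conv_rhs => rw [hdropk]
    rw [show scanP s.length ((digitsOf s)[k] :: (digitsOf s).drop (k + 1)) k total diff =
      scanP s.length ((digitsOf s).drop (k + 1)) (k + 1)
        (total + ((PySem.List.pyRange 0 ((digitsOf s)[k]) 1).map (fun d =>
          W (s.length - 1 - k) (k + 1) (-(diff + sgn k * d)))).sum)
        (diff + sgn k * (digitsOf s)[k]) from rfl]
    rw [show ((k : Int) + 1) = (((k + 1 : Nat)) : Int) from by push_cast; ring]
    rw [show ((total, diff).2 + sgn k * (digitsOf s)[k]) = (diff + sgn k * (digitsOf s)[k]) from rfl]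
    exact ih (k + 1) (by omega)
      (total + ((PySem.List.pyRange 0 ((digitsOf s)[k]) 1).map (fun d =>
        W (s.length - 1 - k) (k + 1) (-(diff + sgn k * d)))).sum)
      (diff + sgn k * (digitsOf s)[k])

lemma fB_eq_dfsP (x : Int) :
    fB x = dfsP (digitsOf ((PySem.Int.toStr x).toList)) 0 true 0 := by
  unfold fB
  simp only []
  have H := scan_fold ((PySem.Int.toStr x).toList) ((PySem.Int.toStr x).toList).length 0
    (by omega) 0 0
  simp only [Nat.cast_zero, List.drop_zero] at H
  rw [H]
  have hspec := scanP_spec ((PySem.Int.toStr x).toList).length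
    (digitsOf ((PySem.Int.toStr x).toList)) 0 0 0
    (by simp [digitsOf]) (by
      intro d hd
      simp only [digitsOf, List.mem_map] at hd
      obtain ⟨c, _, hc⟩ := hd
      rw [← hc]
      exact pyIntOfChar_nonneg c)
  rw [zero_add] at hspec
  rw [hspec]
  split_ifs with h <;> ring

-- ===== VERDICT (by name: the statement is the Claim_ definition above) =====
theorem countBalanced_spec : Claim_equal_countBalanced := by
  intro low high _ _
  show countBalanced low high = countBalanced_alt low high
  unfold countBalanced countBalanced_alt
  simp only []
  rw [countBalanced_eq_dfsP high, countBalanced_eq_dfsP (low - 1), fB_eq_dfsP, fB_eq_dfsP]
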